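-- pv_equiv track=rewrite | github.com/AdamZhouSE/pythonHomework | Code/CodeRecords/2608/58610/247625.py | foo
-- ===== SOURCE A (Python) =====
-- def foo(s: str):
--     vowel = ['a', 'e', 'i', 'o', 'u']
--     while len(s) != 0 and s[0] not in vowel:
--         s = s[1:]
--     while len(s) != 0 and s[-1] in vowel:
--         s = s[:-1]
--     if len(s) == 0:
--         return [-1]
--     res = list(set(permutation(s)))
--     return sorted([s for s in res if len(s) != 0 and s[0] in vowel and s[-1] not in vowel])
--
-- def permutation(s: str) -> list:
--     if len(s) == 0 or len(s) == 1:
--         return [s, '']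
--     else:
--         temp = permutation(s[1:])
--         return [s[0] + i for i in temp] + temp
-- ===== SOURCE B (Python) =====
-- def foo(s: str):
--     vowels = ('a', 'e', 'i', 'o', 'u')
--     # trim: slice from the first vowel up to (and including) the last trailing non-vowel
--     i = 0
--     while i < len(s) and s[i] not in vowels:
--         i += 1
--     j = len(s)
--     while j > i and s[j - 1] in vowels:
--         j -= 1
--     s = s[i:j]
--     if not s:
--         return [-1]
--     # iterative bitmask enumeration of all subsequences
--     subs = set()
--     for m in range(1 << len(s)):
--         subs.add(''.join(s[k] for k in range(len(s)) if (m >> k) & 1))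
--     return sorted(t for t in subs if t and t[0] in vowels and t[-1] not in vowels)
-- ===== Notes on version B (the rewrite author's own statement) =====
-- stated objective: alternative
-- what changed: Replaced the recursive include/exclude permutation() enumeration (and the char-index while-loop trimming) with index-based slice trimming plus an iterative bitmask loop that builds each subsequence directly into a set.
-- outside the precondition, e.g. on foo('bcd'): A returns [-1], B returns [-1]; on foo(''): A returns [-1], B returns [-1]
import Mathlib
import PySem

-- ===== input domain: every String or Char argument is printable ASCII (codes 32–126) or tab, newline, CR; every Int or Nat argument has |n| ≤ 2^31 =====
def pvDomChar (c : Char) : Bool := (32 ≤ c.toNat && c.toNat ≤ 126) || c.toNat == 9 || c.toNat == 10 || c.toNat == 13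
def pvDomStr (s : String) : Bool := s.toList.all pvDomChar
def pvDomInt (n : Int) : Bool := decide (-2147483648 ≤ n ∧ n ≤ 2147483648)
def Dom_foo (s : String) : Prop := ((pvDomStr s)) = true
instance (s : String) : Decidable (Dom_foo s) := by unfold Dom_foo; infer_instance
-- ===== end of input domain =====

-- B replaces A's recursive include/exclude enumeration of all subsequences by an iterative
-- bitmask enumeration into a set (objective: alternative; equivalence is about the RETURN value).

-- shared constant: the vowel list of both Pythons
def pvVowel : List Char := ['a', 'e', 'i', 'o', 'u']

-- shared filter of both Pythons: `t and t[0] in vowel and t[-1] not in vowel`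
def pvGood (cs : List Char) : Bool :=
  match cs with
  | [] => false
  | c :: cs' =>
    decide (c ∈ pvVowel) && !decide ((c :: cs').getLast (List.cons_ne_nil c cs') ∈ pvVowel)

-- ===== PORT A =====
-- while len(s) != 0 and s[0] not in vowel: s = s[1:]
def fooTrimStart : List Char → List Char
  | [] => []
  | c :: cs => if c ∈ pvVowel then c :: cs else fooTrimStart cs

-- while len(s) != 0 and s[-1] in vowel: s = s[:-1]
def fooTrimEnd (l : List Char) : List Char :=
  if h : l = [] then []
  else if l.getLast h ∈ pvVowel then fooTrimEnd l.dropLast else l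
termination_by l.length
decreasing_by
  have : l.length ≠ 0 := fun hl => h (List.length_eq_zero_iff.mp hl)
  simp [List.length_dropLast]; omega

-- def permutation(s): recursive include/exclude list of all subsequences (with duplicates)
def fooPerm : List Char → List (List Char)
  | [] => [[], []]
  | [c] => [[c], []]
  | c :: cs@(_ :: _) =>
    let temp := fooPerm cs
    temp.map (fun i => c :: i) ++ temp

-- A returns [-1] (an int, not a string) when the trimmed string is empty; those inputs are
-- outside Pre_foo, and the port returns [] there.
def foo (s : String) : List String :=
  let t := fooTrimEnd (fooTrimStart s.toList)
  if t = [] then []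
  else
    let res : PySem.Set (List Char) := PySem.Set.ofList (fooPerm t)
    PySem.List.sorted ((res.filter pvGood).map (fun cs => String.ofList cs)) (fun x => x) false

-- ===== PORT B =====
-- the index loops compute s[i:j] = the suffix from the first vowel, with its trailing vowels
-- removed: ported as dropWhile from the front and (via reverse) from the back — exact.
-- Like A, B returns [-1] (outside List String) on an empty trim; the port returns [] there,
-- and Pre_foo excludes exactly those inputs.
def fooAltTrim (l : List Char) : List Char :=
  ((l.dropWhile (fun c => !decide (c ∈ pvVowel))).reverse.dropWhile
      (fun c => decide (c ∈ pvVowel))).reverse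

-- ''.join(s[k] for k in range(len(s)) if (m >> k) & 1): bit k of m read as m % 2 with m / 2
-- as the shift — exact bit-by-bit transcription over the char list.
def fooAltSub : List Char → Nat → List Char
  | [], _ => []
  | c :: cs, m => if m % 2 = 1 then c :: fooAltSub cs (m / 2) else fooAltSub cs (m / 2)

def foo_alt (s : String) : List String :=
  let t := fooAltTrim s.toList
  if t = [] then []
  else
    let subs : PySem.Set (List Char) :=
      PySem.Set.ofList ((List.range (2 ^ t.length)).map (fooAltSub t))
    PySem.List.sorted ((subs.filter pvGood).map (fun cs => String.ofList cs)) (fun x => x) false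

-- ===== PRECONDITION & SPEC =====
-- Pre_foo excludes exactly the inputs whose trimmed string is empty: there A returns [-1],
-- an int inside the list, which is not a value of the declared type List String.
def Pre_foo (s : String) : Prop :=
  ((s.toList.dropWhile (fun c => !decide (c ∈ pvVowel))).any
      (fun c => !decide (c ∈ pvVowel))) = true
instance (s : String) : Decidable (Pre_foo s) := by unfold Pre_foo; infer_instance

def pvWitness_foo : String := "abebib"

def Spec_foo (s : String) (out : List String) : Prop := out = foo_alt s
instance (s : String) (out : List String) : Decidable (Spec_foo s out) := by
  unfold Spec_foo; infer_instance

-- ===== CLAIM (what is proved, stated in full; the proofs are below) =====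
def Claim_equal_foo : Prop := ∀ (s : String), Dom_foo s → Pre_foo s → Spec_foo s (foo s)

-- ===== LEMMAS AND PROOFS =====

-- A's trim loops equal B's dropWhile trimming
theorem fooTrimStart_eq (l : List Char) :
    fooTrimStart l = l.dropWhile (fun c => !decide (c ∈ pvVowel)) := by
  induction l with
  | nil => simp [fooTrimStart]
  | cons c cs ih =>
    by_cases h : c ∈ pvVowel <;> simp [fooTrimStart, List.dropWhile, h, ih]

theorem fooTrimEnd_eq (l : List Char) :
    fooTrimEnd l = (l.reverse.dropWhile (fun c => decide (c ∈ pvVowel))).reverse := by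
  induction l using List.reverseRecOn with
  | nil => simp [fooTrimEnd]
  | append_singleton l c ih =>
    rw [fooTrimEnd]
    have hne : l ++ [c] ≠ [] := by simp
    by_cases h : c ∈ pvVowel <;>
      simp [hne, h, ih]

-- A's recursive permutation enumerates exactly the sublists
theorem mem_fooPerm (l : List Char) : ∀ x : List Char, x ∈ fooPerm l ↔ x.Sublist l := by
  induction l with
  | nil => intro x; simp [fooPerm]
  | cons c cs ih =>
    intro x
    cases cs with
    | nil =>
      constructor
      · intro hx
        simp only [fooPerm, List.mem_cons, List.not_mem_nil, or_false] at hx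
        rcases hx with rfl | rfl
        · exact List.Sublist.refl _
        · exact List.nil_sublist _
      · intro h
        rcases List.sublist_cons_iff.mp h with h' | ⟨r, rfl, h'⟩ <;>
          simp_all [fooPerm, List.sublist_nil.mp]
    | cons d cs' =>
      simp only [fooPerm, List.mem_append, List.mem_map, ih, List.sublist_cons_iff (a := c)]
      constructor
      · rintro (⟨a, ha, rfl⟩ | h)
        · exact Or.inr ⟨a, rfl, ha⟩
        · exact Or.inl h
      · rintro (h | ⟨r, rfl, h⟩)
        · exact Or.inr h
        · exact Or.inl ⟨r, h, rfl⟩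

-- B's mask builder produces sublists …
theorem fooAltSub_sublist (l : List Char) (m : Nat) : (fooAltSub l m).Sublist l := by
  induction l generalizing m with
  | nil => simp [fooAltSub]
  | cons c cs ih =>
    by_cases h : m % 2 = 1
    · rw [fooAltSub, if_pos h]; exact (ih (m / 2)).cons₂ c
    · rw [fooAltSub, if_neg h]; exact (ih (m / 2)).cons c

-- … and every sublist is produced by some mask below 2^length
theorem fooAltSub_surj (l : List Char) (x : List Char) (hx : x.Sublist l) :
    ∃ m < 2 ^ l.length, fooAltSub l m = x := by
  induction l generalizing x with
  | nil => exact ⟨0, by simp, by simpa using (List.sublist_nil.mp hx).symm ▸ rfl⟩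
  | cons c cs ih =>
    rcases List.sublist_cons_iff.mp hx with h | ⟨r, rfl, h⟩
    · obtain ⟨m, hm, he⟩ := ih x h
      refine ⟨2 * m, by simpa [pow_succ] using by omega, ?_⟩
      have h2 : (2 * m) % 2 = 0 := by omega
      simp [fooAltSub, h2, Nat.mul_div_cancel_left m (by norm_num : 0 < 2), he]
    · obtain ⟨m, hm, he⟩ := ih r h
      refine ⟨2 * m + 1, by simpa [pow_succ] using by omega, ?_⟩
      have h2 : (2 * m + 1) % 2 = 1 := by omega
      have h3 : (2 * m + 1) / 2 = m := by omega
      simp [fooAltSub, h2, h3, he]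

-- the two dedup'd subsequence pools are permutations of each other
theorem pools_perm (t : List Char) :
    (PySem.Set.ofList (fooPerm t) : List (List Char)).Perm
      (PySem.Set.ofList ((List.range (2 ^ t.length)).map (fooAltSub t))) := by
  rw [List.perm_ext_iff_of_nodup (PySem.Set.nodup_ofList _) (PySem.Set.nodup_ofList _)]
  intro x
  rw [PySem.Set.mem_ofList, PySem.Set.mem_ofList, mem_fooPerm]
  constructor
  · intro hx
    obtain ⟨m, hm, he⟩ := fooAltSub_surj t x hx
    exact List.mem_map.mpr ⟨m, List.mem_range.mpr hm, he⟩
  · intro hx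
    obtain ⟨m, _, he⟩ := List.mem_map.mp hx
    exact he ▸ fooAltSub_sublist t m

-- ===== VERDICT (by name: the statement is the Claim_ definition above) =====
theorem foo_spec : Claim_equal_foo := by
  intro s _ hpre
  unfold Spec_foo foo foo_alt fooAltTrim
  rw [fooTrimStart_eq, fooTrimEnd_eq]
  set t := ((s.toList.dropWhile (fun c => !decide (c ∈ pvVowel))).reverse.dropWhile
      (fun c => decide (c ∈ pvVowel))).reverse with ht
  have htne : t ≠ [] := by
    unfold Pre_foo at hpre
    rw [List.any_eq_true] at hpre
    obtain ⟨c, hc, hcv⟩ := hpre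
    intro h0
    have h1 : (s.toList.dropWhile fun c => !decide (c ∈ pvVowel)).reverse.dropWhile
        (fun c => decide (c ∈ pvVowel)) = [] := by
      rw [ht, List.reverse_eq_nil_iff] at h0; exact h0
    rw [List.dropWhile_eq_nil_iff] at h1
    have := h1 c (List.mem_reverse.mpr hc)
    simp_all
  simp only [htne, reduceIte]
  exact PySem.List.sorted_eq_sorted_of_perm _ _ _ (fun a b h => h)
    (((pools_perm t).filter pvGood).map (fun cs => String.ofList cs))
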